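-- pv_equiv track=rewrite | github.com/madinsoft/rl-games | src/envs/gy2048/env.py | _try_merge
-- ===== SOURCE A (Python) =====
-- def _try_merge(row):
--     score = 0
--     result_row = []
--
--     i = 1
--     while i < len(row):
--         if row[i] == row[i - 1]:
--             score += row[i] + row[i - 1]
--             result_row.append(row[i] + row[i - 1])
--             i += 2
--         else:
--             result_row.append(row[i - 1])
--             i += 1
--
--     if i == len(row):
--         result_row.append(row[i - 1])
--
--     return score, result_row
-- ===== SOURCE B (Python) =====
-- def _try_merge(row):
--     # Stage 1: run-length encode the row into maximal runs of equal tiles.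
--     runs = []
--     for x in row:
--         if runs and runs[-1][0] == x:
--             runs[-1][1] += 1
--         else:
--             runs.append([x, 1])
--     # Stage 2: a run of k equal tiles v merges into k//2 tiles of 2v
--     # (greedy non-overlapping left-to-right pairing) plus a leftover v if k is odd.
--     score = 0
--     result = []
--     for v, k in runs:
--         merged = v + v
--         score += (k // 2) * merged
--         result.extend([merged] * (k // 2))
--         if k % 2:
--             result.append(v)
--     return score, result
-- ===== Notes on version B (the rewrite author's own statement) =====
-- stated objective: alternative
-- what changed: Replaces A's single variable-stride pairwise-comparison loop by two staged passes: first run-length encode the row into maximal runs (value, count), then emit k//2 merged tiles and an odd leftover per run by arithmetic, with the score computed as (k//2)*2v per run instead of per merge.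
import Mathlib
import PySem

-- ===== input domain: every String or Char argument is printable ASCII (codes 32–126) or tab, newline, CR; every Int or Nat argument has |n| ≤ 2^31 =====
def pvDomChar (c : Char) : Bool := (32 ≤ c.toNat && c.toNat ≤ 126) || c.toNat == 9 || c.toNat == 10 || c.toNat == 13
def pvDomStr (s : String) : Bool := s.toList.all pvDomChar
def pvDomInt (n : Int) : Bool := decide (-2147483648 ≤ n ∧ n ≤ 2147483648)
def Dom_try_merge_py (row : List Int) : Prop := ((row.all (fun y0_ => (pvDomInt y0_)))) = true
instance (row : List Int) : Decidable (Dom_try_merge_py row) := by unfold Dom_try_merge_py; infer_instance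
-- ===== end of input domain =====

-- B replaces A's variable-stride pairwise merge loop by two staged passes: run-length
-- encoding into maximal runs, then per-run arithmetic emission (objective: alternative
-- algorithm of the same O(n) cost).

-- ===== PORT A =====
-- A's while loop: index i starting at 1, stepping by 1 or 2; all list indices used
-- (i and i-1 inside the loop, i-1 in the tail append) are always in range, so getD 0
-- is exact (the default is never taken).
def tryMergeLoopA (row : List Int) (i : Nat) (score : Int) (acc : List Int) : Int × List Int :=
  if _h : i < row.length then
    if row.getD i 0 = row.getD (i - 1) 0 then
      tryMergeLoopA row (i + 2) (score + (row.getD i 0 + row.getD (i - 1) 0))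
        (acc ++ [row.getD i 0 + row.getD (i - 1) 0])
    else
      tryMergeLoopA row (i + 1) score (acc ++ [row.getD (i - 1) 0])
  else if i = row.length then (score, acc ++ [row.getD (i - 1) 0])
  else (score, acc)
termination_by row.length - i
decreasing_by all_goals omega

def try_merge_py (row : List Int) : Int × List Int :=
  tryMergeLoopA row 1 0 []

-- ===== PORT B =====
-- B stage 1: run-length encode (runs and runs[-1][0] == x → bump last count, else
-- append [x,1]); counts are Python non-negative ints, carried here as Nat, so Python's
-- k//2 and k%2 are exactly Nat division/mod.
def runsStep (runs : List (Int × Nat)) (x : Int) : List (Int × Nat) :=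
  match runs.getLast? with
  | some (v, k) => if v = x then runs.dropLast ++ [(v, k + 1)] else runs ++ [(x, 1)]
  | none => [(x, 1)]

-- B stage 2: per run (v,k) add (k//2)*2v to the score, extend with [2v]*(k//2), and
-- append a leftover v when k is odd.
def emitStep (acc : Int × List Int) (p : Int × Nat) : Int × List Int :=
  ((acc.1 + ((p.2 / 2 : Nat) : Int) * (p.1 + p.1)),
   acc.2 ++ List.replicate (p.2 / 2) (p.1 + p.1) ++ (if p.2 % 2 = 1 then [p.1] else []))

def try_merge_py_alt (row : List Int) : Int × List Int :=
  (row.foldl runsStep []).foldl emitStep (0, [])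

-- ===== PRECONDITION & SPEC =====
def Spec_try_merge_py (row : List Int) (out : Int × List Int) : Prop := out = try_merge_py_alt row
instance (row : List Int) (out : Int × List Int) : Decidable (Spec_try_merge_py row out) := by unfold Spec_try_merge_py; infer_instance

-- ===== CLAIM (what is proved, stated in full; the proofs are below) =====
def Claim_equal_try_merge_py : Prop := ∀ (row : List Int), Dom_try_merge_py row → Spec_try_merge_py row (try_merge_py row)

-- ===== LEMMAS AND PROOFS =====

-- Reference characterisation: greedy non-overlapping left-to-right merge, structurally.
def mergeSpec : List Int → Int × List Int
  | [] => (0, [])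
  | [x] => (0, [x])
  | x :: y :: rest =>
      if x = y then
        let p := mergeSpec rest
        (x + y + p.1, (x + y) :: p.2)
      else
        let p := mergeSpec (y :: rest)
        (p.1, x :: p.2)

-- ---- A = mergeSpec ----

lemma getD_drop_cons {row rest : List Int} {m : Nat} {x : Int}
    (h : row.drop m = x :: rest) : row.getD m 0 = x := by
  have h0 : (row.drop m)[0]? = some x := by rw [h]; rfl
  rw [List.getElem?_drop] at h0
  simp only [Nat.add_zero] at h0
  simp [List.getD_eq_getElem?_getD, h0]

lemma loopA_eq_mergeSpec (n : Nat) : ∀ (row : List Int) (i : Nat) (s : Int) (acc : List Int),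
    1 ≤ i → row.length + 1 - i ≤ n →
    tryMergeLoopA row i s acc =
      (s + (mergeSpec (row.drop (i - 1))).1, acc ++ (mergeSpec (row.drop (i - 1))).2) := by
  induction n with
  | zero =>
    intro row i s acc h1 hn
    have : ¬ i < row.length := by omega
    have hgt : ¬ i = row.length := by omega
    rw [tryMergeLoopA, dif_neg this, if_neg hgt]
    have : row.drop (i - 1) = [] := List.drop_eq_nil_of_le (by omega)
    simp [this, mergeSpec]
  | succ n ih =>
    intro row i s acc h1 hn
    rw [tryMergeLoopA]
    by_cases hlt : i < row.length
    · -- drop (i-1) has at least two elements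
      obtain ⟨x, t, hx⟩ : ∃ x t, row.drop (i - 1) = x :: t := by
        cases hd : row.drop (i - 1) with
        | nil => exact absurd (List.drop_eq_nil_iff.mp hd) (by omega)
        | cons a l => exact ⟨a, l, rfl⟩
      obtain ⟨y, u, hy⟩ : ∃ y u, t = y :: u := by
        cases ht : t with
        | nil =>
          exfalso
          have := congrArg List.length hx
          simp [ht] at this
          omega
        | cons a l => exact ⟨a, l, rfl⟩
      have hgetx : row.getD (i - 1) 0 = x := getD_drop_cons hx
      have hgety : row.getD i 0 = y := by
        apply getD_drop_cons (rest := u)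
        have : row.drop i = t := by
          have := congrArg (List.drop 1) hx
          simpa [List.drop_drop, show i - 1 + 1 = i from by omega] using this
        rw [this, hy]
      have hdropi : row.drop i = y :: u := by
        have := congrArg (List.drop 1) hx
        simpa [List.drop_drop, show i - 1 + 1 = i from by omega, hy] using this
      have hdropi1 : row.drop (i + 1) = u := by
        have := congrArg (List.drop 1) hdropi
        simpa [List.drop_drop] using this
      rw [dif_pos hlt, hgetx, hgety]
      by_cases heq : y = x
      · rw [if_pos heq]
        rw [ih row (i + 2) _ _ (by omega) (by omega)]
        rw [show i + 2 - 1 = i + 1 from by omega, hdropi1]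
        rw [hx, hy, heq]
        simp [mergeSpec]
        ring_nf
      · rw [if_neg heq]
        rw [ih row (i + 1) _ _ (by omega) (by omega)]
        rw [show i + 1 - 1 = i from by omega, hdropi]
        rw [hx, hy]
        have hne : x ≠ y := fun h => heq h.symm
        simp [mergeSpec, hne]
    · rw [dif_neg hlt]
      by_cases hend : i = row.length
      · obtain ⟨x, hx⟩ : ∃ x, row.drop (i - 1) = [x] := by
          have hlen : (row.drop (i - 1)).length = 1 := by
            simp [List.length_drop]; omega
          cases hd : row.drop (i - 1) with
          | nil => simp [hd] at hlen
          | cons a l =>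
            rw [hd] at hlen
            simp at hlen
            subst hlen
            exact ⟨a, rfl⟩
        rw [if_pos hend, hx, getD_drop_cons hx]
        simp [mergeSpec]
      · rw [if_neg hend]
        have : row.drop (i - 1) = [] := List.drop_eq_nil_of_le (by omega)
        simp [this, mergeSpec]

lemma portA_eq_mergeSpec (row : List Int) : try_merge_py row = mergeSpec row := by
  unfold try_merge_py
  rw [loopA_eq_mergeSpec (row.length + 1) row 1 0 [] (by omega) (by omega)]
  simp

-- ---- B = mergeSpec ----

-- Only the last run is ever touched: a nonempty suffix of the runs list can be split off.
lemma foldl_runsStep_prefix : ∀ (xs : List Int) (done rs : List (Int × Nat)), rs ≠ [] →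
    List.foldl runsStep (done ++ rs) xs = done ++ List.foldl runsStep rs xs := by
  intro xs
  induction xs with
  | nil => intro done rs _; simp
  | cons x t ih =>
    intro done rs hne
    have hstep : runsStep (done ++ rs) x = done ++ runsStep rs x := by
      unfold runsStep
      rw [List.getLast?_append_of_ne_nil done hne]
      cases hg : rs.getLast? with
      | none => exact absurd (List.getLast?_eq_none_iff.mp hg) hne
      | some p =>
        cases p with
        | mk v k =>
          by_cases hv : v = x
          · simp [hv, List.dropLast_append_of_ne_nil hne]
          · simp [hv]
    have hstepne : runsStep rs x ≠ [] := by
      unfold runsStep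
      cases hg : rs.getLast? with
      | none => simp
      | some p =>
        cases p with
        | mk v k => by_cases hv : v = x <;> simp [hv]
    simp only [List.foldl_cons, hstep]
    exact ih done (runsStep rs x) hstepne

-- Shifting the emit accumulator.
lemma foldl_emitStep_shift : ∀ (l : List (Int × Nat)) (p : Int × List Int),
    List.foldl emitStep p l =
      (p.1 + (List.foldl emitStep (0, []) l).1, p.2 ++ (List.foldl emitStep (0, []) l).2) := by
  intro l
  induction l with
  | nil => intro p; simp
  | cons q t ih =>
    intro p
    simp only [List.foldl_cons]
    rw [ih (emitStep p q), ih (emitStep (0, []) q)]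
    simp [emitStep]
    ring

-- A run of k copies of v followed by a rest not starting with v merges to
-- k/2 tiles of 2v plus an odd leftover, scoring (k/2)*2v.
lemma mergeSpec_run : ∀ (k : Nat) (v : Int) (rest : List Int),
    (∀ y, rest.head? = some y → y ≠ v) →
    mergeSpec (List.replicate k v ++ rest) =
      (((k / 2 : Nat) : Int) * (v + v) + (mergeSpec rest).1,
       List.replicate (k / 2) (v + v) ++ List.replicate (k % 2) v ++ (mergeSpec rest).2) := by
  intro k
  induction k using Nat.strong_induction_on with
  | _ k ih =>
    intro v rest hrest
    match k with
    | 0 => simp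
    | 1 =>
      cases rest with
      | nil => simp [mergeSpec]
      | cons y u =>
        have hyv : y ≠ v := hrest y rfl
        have hvy : v ≠ y := fun h => hyv h.symm
        simp [mergeSpec, hvy]
    | (m + 2) =>
      have hsplit : List.replicate (m + 2) v ++ rest = v :: v :: (List.replicate m v ++ rest) := by
        simp [List.replicate_succ]
      rw [hsplit]
      show mergeSpec (v :: v :: (List.replicate m v ++ rest)) = _
      rw [mergeSpec]
      rw [if_pos rfl]
      rw [ih m (by omega) v rest hrest]
      have h2 : (m + 2) / 2 = m / 2 + 1 := by omega
      have h2' : (m + 2) % 2 = m % 2 := by omega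
      simp only [h2, h2', Prod.mk.injEq]
      constructor
      · push_cast; ring
      · simp [List.replicate_succ]

-- Folding the run-length encoder from a single seeded run, then emitting,
-- equals mergeSpec of the decoded list.
lemma foldl_runs_emit : ∀ (xs : List Int) (v : Int) (k : Nat), 1 ≤ k →
    List.foldl emitStep (0, []) (List.foldl runsStep [(v, k)] xs) =
      mergeSpec (List.replicate k v ++ xs) := by
  intro xs
  induction xs with
  | nil =>
    intro v k hk
    simp only [List.foldl_nil]
    rw [mergeSpec_run k v [] (by simp)]
    simp [emitStep, mergeSpec]
    rcases Nat.mod_two_eq_zero_or_one k with h | h <;> simp [h]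
  | cons x t ih =>
    intro v k hk
    simp only [List.foldl_cons]
    by_cases hv : v = x
    · have : runsStep [(v, k)] x = [(v, k + 1)] := by simp [runsStep, hv]
      rw [this, ih v (k + 1) (by omega), ← hv]
      congr 1
      simp [List.replicate_succ']
    · have hstep : runsStep [(v, k)] x = [(v, k)] ++ [(x, 1)] := by simp [runsStep, hv]
      rw [hstep, foldl_runsStep_prefix t [(v, k)] [(x, 1)] (by simp)]
      simp only [List.singleton_append, List.foldl_cons]
      rw [foldl_emitStep_shift]
      rw [ih x 1 (by omega)]
      have hxv : x ≠ v := fun h => hv h.symm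
      rw [mergeSpec_run k v (x :: t) (by intro y hy; simp at hy; subst hy; exact hxv)]
      simp [emitStep]
      rcases Nat.mod_two_eq_zero_or_one k with h | h <;> simp [h]

lemma portB_eq_mergeSpec (row : List Int) : try_merge_py_alt row = mergeSpec row := by
  unfold try_merge_py_alt
  cases row with
  | nil => simp [mergeSpec]
  | cons x t =>
    have : runsStep [] x = [(x, 1)] := by simp [runsStep]
    rw [List.foldl_cons, this, foldl_runs_emit t x 1 (by omega)]
    simp

-- ===== VERDICT (by name: the statement is the Claim_ definition above) =====
theorem try_merge_py_spec : Claim_equal_try_merge_py := by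
  intro row _
  show try_merge_py row = try_merge_py_alt row
  rw [portA_eq_mergeSpec, portB_eq_mergeSpec]
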